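-- pv_equiv track=rewrite | github.com/pypi-data/pypi-mirror-402 | packages/darl/darl-0.0.3.tar.gz/darl-0.0.3/src/darl/service_mapping.py | filter_path_to_scopes
-- ===== SOURCE A (Python) =====
-- def filter_path_to_scopes(path, scopes):
--     filtered_path = []
--     scope_idxs = [0 for _ in scopes]
--     for element in path:
--         add_element = False
--         for i, (scope, scope_idx) in enumerate(zip(scopes, scope_idxs)):
--             try:
--                 scope_element = scope[scope_idx]
--             except IndexError:
--                 continue
--             else:
--                 if element == scope_element:
--                     add_element = True
--                     scope_idxs[i] += 1
--         if add_element: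
--             filtered_path.append(element)
--     return tuple(filtered_path)
-- ===== SOURCE B (Python) =====
-- def filter_path_to_scopes(path, scopes):
--     # Bucket scopes by their next expected element; per path element only the
--     # matching bucket is touched, instead of scanning every scope.
--     buckets = {}
--     for scope in scopes:
--         if scope:
--             buckets.setdefault(scope[0], []).append(scope[1:])
--     filtered = []
--     for element in path:
--         tails = buckets.pop(element, None)
--         if tails:
--             filtered.append(element)
--             for t in tails:
--                 if t:
--                     buckets.setdefault(t[0], []).append(t[1:])
--     return tuple(filtered)
-- ===== Notes on version B (the rewrite author's own statement) =====
-- stated objective: faster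
-- what changed: Instead of scanning every scope for every path element with per-scope indices, B buckets the scope suffixes in a dict keyed by their next expected element, so each path element pops and re-buckets only the scopes it matches.
import Mathlib
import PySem

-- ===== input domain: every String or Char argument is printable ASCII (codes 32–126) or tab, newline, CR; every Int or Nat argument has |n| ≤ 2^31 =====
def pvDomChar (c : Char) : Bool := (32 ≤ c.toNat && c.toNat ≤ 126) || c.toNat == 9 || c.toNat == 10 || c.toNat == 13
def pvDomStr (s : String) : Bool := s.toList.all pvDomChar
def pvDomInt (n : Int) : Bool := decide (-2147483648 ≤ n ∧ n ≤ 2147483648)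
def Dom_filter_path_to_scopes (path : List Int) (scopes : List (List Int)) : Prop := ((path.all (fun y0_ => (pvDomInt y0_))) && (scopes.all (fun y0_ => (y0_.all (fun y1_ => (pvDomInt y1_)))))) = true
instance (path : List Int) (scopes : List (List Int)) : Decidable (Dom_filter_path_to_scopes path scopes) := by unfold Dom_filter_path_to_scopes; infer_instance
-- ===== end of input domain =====

-- B buckets the scopes by their next expected element in a dict, so each path element touches only
-- the scopes it currently matches instead of scanning all of them (objective: faster).
-- A returns a tuple built from a local list; neither version mutates its arguments.

-- ===== PORT A =====
-- inner loop body: for i, (scope, scope_idx) in enumerate(zip(scopes, scope_idxs)):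
--   try: scope[scope_idx] except IndexError: continue; else: if element == scope_element: …
def pvAstep (e : Int) (acc : Bool × List Int) (p : Int × (List Int × Int)) : Bool × List Int :=
  match PySem.List.pyGet? p.2.1 p.2.2 with
  | none => acc                                     -- except IndexError: continue
  | some se => if e = se then (true, acc.2.set p.1.toNat (p.2.2 + 1)) else acc

def filter_path_to_scopes (path : List Int) (scopes : List (List Int)) : List Int :=
  (path.foldl (fun (st : List Int × List Int) e =>
      let r := (PySem.List.enumerate (scopes.zip st.2) 0).foldl (pvAstep e) (false, st.2)
      if r.1 then (st.1 ++ [e], r.2) else (st.1, r.2))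
    ([], scopes.map (fun _ => (0 : Int)))).1

-- ===== PORT B =====
-- buckets.setdefault(s[0], []).append(s[1:])  (does nothing for empty s, as guarded in Source B)
def pvInsertTail (d : PySem.Dict Int (List (List Int))) (s : List Int) : PySem.Dict Int (List (List Int)) :=
  match s with
  | [] => d
  | h :: t => d.modify h [] (· ++ [t])

-- body of 'for element in path': tails = buckets.pop(element, None); if tails: …
def pvBstep (st : List Int × PySem.Dict Int (List (List Int))) (e : Int) :
    List Int × PySem.Dict Int (List (List Int)) :=
  match st.2.get? e with
  | none => st
  | some ts =>
    let d := st.2.erase e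
    if ts = [] then (st.1, d)                        -- 'if tails:' is falsy on []
    else (st.1 ++ [e], ts.foldl pvInsertTail d)

def filter_path_to_scopes_alt (path : List Int) (scopes : List (List Int)) : List Int :=
  let buckets := scopes.foldl pvInsertTail PySem.Dict.empty
  (path.foldl pvBstep ([], buckets)).1

-- ===== PRECONDITION & SPEC =====
def Spec_filter_path_to_scopes (path : List Int) (scopes : List (List Int)) (out : List Int) : Prop := out = filter_path_to_scopes_alt path scopes
instance (path : List Int) (scopes : List (List Int)) (out : List Int) : Decidable (Spec_filter_path_to_scopes path scopes out) := by unfold Spec_filter_path_to_scopes; infer_instance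

-- ===== CLAIM (what is proved, stated in full; the proofs are below) =====
def Claim_equal_filter_path_to_scopes : Prop := ∀ (path : List Int) (scopes : List (List Int)), Dom_filter_path_to_scopes path scopes → Spec_filter_path_to_scopes path scopes (filter_path_to_scopes path scopes)

-- ===== LEMMAS AND PROOFS =====

-- Common model: the list of remaining scope suffixes, advanced per path element.
def pvTailsFor (v : Int) (rem : List (List Int)) : List (List Int) :=
  rem.filterMap (fun s => if s.head? = some v then some s.tail else none)

def pvAdvance (e : Int) (rem : List (List Int)) : List (List Int) :=
  rem.map (fun s => if s.head? = some e then s.tail else s)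

def pvMstep (st : List Int × List (List Int)) (e : Int) : List Int × List (List Int) :=
  (if pvTailsFor e st.2 ≠ [] then st.1 ++ [e] else st.1, pvAdvance e st.2)

-- ===== A-side: the scan over enumerate(zip(scopes, scope_idxs)) characterised =====
theorem A_scan (e : Int) :
    ∀ (ss : List (List Int)) (ns : List Nat), ns.length = ss.length →
      ∀ (pre : List Int) (b : Bool),
      ((PySem.List.enumerate (ss.zip (ns.map (Nat.cast : Nat → Int))) (pre.length : Int)).foldl
          (pvAstep e) (b, pre ++ ns.map (Nat.cast : Nat → Int)))
      = (b || decide (pvTailsFor e (List.zipWith (fun s n => s.drop n) ss ns) ≠ []),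
         pre ++ (List.zipWith (fun s n =>
            if (s.drop n).head? = some e then n + 1 else n) ss ns).map (Nat.cast : Nat → Int)) := by
  intro ss
  induction ss with
  | nil =>
    intro ns hlen pre b
    rw [List.length_nil, List.length_eq_zero_iff] at hlen; subst hlen
    simp [pvTailsFor]
  | cons s ss ih =>
    intro ns hlen pre b
    cases ns with
    | nil => simp at hlen
    | cons n ns =>
      simp only [List.length_cons, Nat.add_right_cancel_iff] at hlen
      have hstep : pvAstep e (b, pre ++ ((n : Int) :: ns.map (Nat.cast : Nat → Int)))
          ((pre.length : Int), (s, (n : Int)))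
          = if (s.drop n).head? = some e
            then (true, (pre ++ [(((n+1 : Nat)) : Int)]) ++ ns.map (Nat.cast : Nat → Int))
            else (b, (pre ++ [((n : Nat) : Int)]) ++ ns.map (Nat.cast : Nat → Int)) := by
        have hget : PySem.List.pyGet? s ((n : Nat) : Int) = (s.drop n).head? := by
          simp [pysem, List.head?_drop]
        rw [pvAstep.eq_def]
        simp only [hget]
        cases hm : (s.drop n).head? with
        | none => simp [List.append_assoc]
        | some se =>
          by_cases he : e = se
          · subst he
            rw [if_pos rfl]
            rw [Int.toNat_natCast, List.set_append]
            push_cast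
            simp [List.append_assoc]
          · have hne : ¬ (se = e) := fun hh => he hh.symm
            simp [he, hne, List.append_assoc]
      simp only [List.map_cons, List.zip_cons_cons, PySem.List.enumerate_cons, List.foldl_cons]
      rw [hstep]
      by_cases hm : (s.drop n).head? = some e
      · rw [if_pos hm]
        have hl : ((pre.length : Int) + 1) = (((pre ++ [(((n+1 : Nat)) : Int)]).length : Int)) := by
          simp
        rw [hl, ih ns hlen (pre ++ [(((n+1 : Nat)) : Int)]) true]
        have hm' : s[n]? = some e := by rw [← List.head?_drop]; exact hm
        simp [pvTailsFor, hm', List.append_assoc]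
      · rw [if_neg hm]
        have hl : ((pre.length : Int) + 1) = (((pre ++ [((n : Nat) : Int)]).length : Int)) := by
          simp
        rw [hl, ih ns hlen (pre ++ [((n : Nat) : Int)]) b]
        have hm' : ¬ (s[n]? = some e) := by rw [← List.head?_drop]; exact hm
        simp [pvTailsFor, hm', List.append_assoc]

theorem zip_drop_upd (e : Int) :
    ∀ (ss : List (List Int)) (ns : List Nat),
      List.zipWith (fun s n => s.drop n) ss
        (List.zipWith (fun s n => if (s.drop n).head? = some e then n + 1 else n) ss ns)
      = pvAdvance e (List.zipWith (fun s n => s.drop n) ss ns) := by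
  intro ss
  induction ss with
  | nil => intro ns; simp [pvAdvance]
  | cons s ss ih =>
    intro ns
    cases ns with
    | nil => simp [pvAdvance]
    | cons n ns =>
      simp only [List.zipWith_cons_cons, pvAdvance, List.map_cons]
      by_cases hm : (s.drop n).head? = some e
      · have hm' : s[n]? = some e := by rw [← List.head?_drop]; exact hm
        simp only [hm, List.tail_drop]
        rw [ih ns]; rfl
      · have hm' : ¬ (s[n]? = some e) := by rw [← List.head?_drop]; exact hm
        simp only [hm, if_false]
        rw [ih ns]; rfl

-- A's loop simulates the model
theorem A_model (scopes : List (List Int)) :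
    ∀ (path out : List Int) (ns : List Nat), ns.length = scopes.length →
      (path.foldl (fun (st : List Int × List Int) e =>
          let r := (PySem.List.enumerate (scopes.zip st.2) 0).foldl (pvAstep e) (false, st.2)
          if r.1 then (st.1 ++ [e], r.2) else (st.1, r.2))
        (out, ns.map (Nat.cast : Nat → Int))).1
      = (path.foldl pvMstep (out, List.zipWith (fun s n => s.drop n) scopes ns)).1 := by
  intro path
  induction path with
  | nil => intro out ns _; rfl
  | cons e rest ih =>
    intro out ns hlen
    have hscan := A_scan e scopes ns hlen [] false
    simp only [List.nil_append, List.length_nil, Nat.cast_zero] at hscan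
    simp only [List.foldl_cons, hscan]
    have hlen' : (List.zipWith (fun s n =>
        if (s.drop n).head? = some e then n + 1 else n) scopes ns).length = scopes.length := by
      simp [List.length_zipWith, hlen]
    by_cases hp : pvTailsFor e (List.zipWith (fun s n => s.drop n) scopes ns) = []
    · simp only [hp, ne_eq, not_true_eq_false, decide_false, Bool.false_eq_true, if_false,
        Bool.false_or]
      rw [ih out _ hlen', zip_drop_upd]
      simp [pvMstep, hp]
    · simp only [hp, ne_eq, not_false_eq_true, decide_true, Bool.false_or, if_true]
      rw [ih (out ++ [e]) _ hlen', zip_drop_upd]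
      simp [pvMstep, hp]

-- ===== B-side =====
theorem tailsFor_cons (v : Int) (s : List Int) (l : List (List Int)) :
    pvTailsFor v (s :: l)
    = if s.head? = some v then s.tail :: pvTailsFor v l else pvTailsFor v l := by
  by_cases h : s.head? = some v <;> simp [pvTailsFor, h]

theorem find?_filter_erase (k v : Int) :
    ∀ (items : List (Int × List (List Int))),
      List.find? (fun p => p.1 == v) (items.filter (fun p => !(p.1 == k)))
      = if v = k then none else List.find? (fun p => p.1 == v) items := by
  intro items
  induction items with
  | nil => simp
  | cons p rest ih =>
    rw [List.filter_cons]
    by_cases hk : p.1 = k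
    · simp only [hk, beq_self_eq_true, Bool.not_true, Bool.false_eq_true, if_false, ih]
      by_cases hv : v = k
      · simp [hv]
      · have hne : ¬ ((p.1 == v) = true) := by
          simp only [hk, beq_iff_eq]; exact fun hh => hv hh.symm
        simp [hv, hne]
    · have hbk : (!(p.1 == k)) = true := by simp [hk]
      rw [hbk, if_pos rfl]
      by_cases hv : p.1 = v
      · have hvk : ¬ (v = k) := fun hh => hk (hv.trans hh)
        simp [hv, hvk]
      · have hne : ¬ ((p.1 == v) = true) := by simp [hv]
        simp [hne, ih]

theorem getD_erase_eq (d : PySem.Dict Int (List (List Int))) (k v : Int) :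
    (d.erase k).getD v [] = if v = k then [] else d.getD v [] := by
  rcases d with ⟨items⟩
  simp only [PySem.Dict.erase, PySem.Dict.getD, PySem.Dict.get?, find?_filter_erase]
  by_cases hv : v = k <;> simp [hv]

theorem getD_foldl_insertTail (ts : List (List Int)) (d : PySem.Dict Int (List (List Int)))
    (v : Int) :
    (ts.foldl pvInsertTail d).getD v [] = d.getD v [] ++ pvTailsFor v ts := by
  induction ts generalizing d with
  | nil => simp [pvTailsFor]
  | cons s rest ih =>
    cases s with
    | nil => simp [pvInsertTail, tailsFor_cons, ih]
    | cons h t =>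
      simp only [List.foldl_cons, pvInsertTail, ih, tailsFor_cons]
      by_cases hv : h = v
      · subst hv
        simp [PySem.Dict.getD_modify_self]
      · rw [PySem.Dict.getD_modify_of_ne _ _ _ (fun hh : v = h => hv hh.symm)]
        simp [hv]

theorem tailsFor_advance (e v : Int) (rem : List (List Int)) :
    (pvTailsFor v (pvAdvance e rem)).Perm
      ((if v = e then [] else pvTailsFor v rem) ++ pvTailsFor v (pvTailsFor e rem)) := by
  induction rem with
  | nil => simp [pvTailsFor, pvAdvance]
  | cons s rest ih =>
    rw [show pvAdvance e (s :: rest)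
        = ((if s.head? = some e then s.tail else s) :: pvAdvance e rest) from rfl]
    by_cases he : s.head? = some e
    · rw [if_pos he]
      by_cases hv : v = e
      · subst hv
        simp only [↓reduceIte, List.nil_append] at ih ⊢
        rw [tailsFor_cons v s.tail (pvAdvance v rest), tailsFor_cons v s rest, if_pos he,
          tailsFor_cons v s.tail (pvTailsFor v rest)]
        by_cases ht : s.tail.head? = some v
        · rw [if_pos ht, if_pos ht]; exact ih.cons _
        · rw [if_neg ht, if_neg ht]; exact ih
      · have hne : ¬ (s.head? = some v) := by
          rw [he]; exact fun hh => hv (Option.some.inj hh).symm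
        simp only [if_neg hv] at ih ⊢
        rw [tailsFor_cons v s.tail (pvAdvance e rest), tailsFor_cons v s rest, if_neg hne,
          tailsFor_cons e s rest, if_pos he, tailsFor_cons v s.tail (pvTailsFor e rest)]
        by_cases ht : s.tail.head? = some v
        · rw [if_pos ht, if_pos ht]
          exact (ih.cons _).trans List.perm_middle.symm
        · rw [if_neg ht, if_neg ht]; exact ih
    · rw [if_neg he, tailsFor_cons v s (pvAdvance e rest), tailsFor_cons e s rest, if_neg he]
      by_cases hv : v = e
      · subst hv
        simp only [↓reduceIte, List.nil_append] at ih ⊢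
        rw [if_neg he]
        exact ih
      · simp only [if_neg hv] at ih ⊢
        rw [tailsFor_cons v s rest]
        by_cases hs : s.head? = some v
        · rw [if_pos hs, if_pos hs]; exact ih.cons _
        · rw [if_neg hs, if_neg hs]; exact ih

def pvInv (d : PySem.Dict Int (List (List Int))) (rem : List (List Int)) : Prop :=
  ∀ v : Int, (d.getD v []).Perm (pvTailsFor v rem)

-- B's loop simulates the model
theorem B_model (path : List Int) :
    ∀ (out : List Int) (d : PySem.Dict Int (List (List Int))) (rem : List (List Int)),
      pvInv d rem →
      (path.foldl pvBstep (out, d)).1 = (path.foldl pvMstep (out, rem)).1 := by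
  induction path with
  | nil => intro out d rem _; rfl
  | cons e rest ih =>
    intro out d rem hinv
    have hbucket : (d.getD e []).Perm (pvTailsFor e rem) := hinv e
    have hadv : ∀ (d' : PySem.Dict Int (List (List Int))),
        (∀ v, (d'.getD v []).Perm ((if v = e then [] else pvTailsFor v rem)
            ++ pvTailsFor v (pvTailsFor e rem))) → pvInv d' (pvAdvance e rem) := by
      intro d' h v
      exact (h v).trans (tailsFor_advance e v rem).symm
    cases hget : d.get? e with
    | none =>
      have hred : pvBstep (out, d) e = (out, d) := by simp only [pvBstep, hget]
      simp only [List.foldl_cons, hred]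
      have h0 : d.getD e [] = [] := PySem.Dict.getD_of_get?_eq_none d [] hget
      have hT : pvTailsFor e rem = [] := (h0 ▸ hbucket).symm.eq_nil
      have hTT : ∀ v, pvTailsFor v (pvTailsFor e rem) = [] := fun v => by rw [hT]; rfl
      rw [ih out d (pvAdvance e rem) (hadv d (by
        intro v
        rw [hTT v, List.append_nil]
        rcases eq_or_ne v e with rfl | hne
        · rw [if_pos rfl, h0]
        · rw [if_neg hne]; exact hinv v))]
      simp [pvMstep, hT]
    | some ts =>
      have hred : pvBstep (out, d) e
          = if ts = [] then (out, d.erase e)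
            else (out ++ [e], ts.foldl pvInsertTail (d.erase e)) := by
        simp only [pvBstep, hget]
      simp only [List.foldl_cons, hred]
      have hts : d.getD e [] = ts := PySem.Dict.getD_of_get?_eq_some d [] hget
      have hperm : ts.Perm (pvTailsFor e rem) := hts ▸ hbucket
      have herase : ∀ v, ((d.erase e).getD v []).Perm
          (if v = e then [] else pvTailsFor v rem) := by
        intro v; rw [getD_erase_eq]
        split_ifs with h
        · exact List.Perm.refl _
        · exact hinv v
      by_cases hts0 : ts = []
      · have hT : pvTailsFor e rem = [] := by
          rw [hts0] at hperm; exact hperm.symm.eq_nil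
        have hTT : ∀ v, pvTailsFor v (pvTailsFor e rem) = [] := fun v => by rw [hT]; rfl
        rw [if_pos hts0]
        rw [ih out (d.erase e) (pvAdvance e rem) (hadv _ (by
          intro v
          rw [hTT v, List.append_nil]
          exact herase v))]
        simp [pvMstep, hT]
      · have hT : pvTailsFor e rem ≠ [] := fun h => hts0 ((h ▸ hperm).eq_nil)
        simp only [if_neg hts0]
        rw [ih (out ++ [e]) (ts.foldl pvInsertTail (d.erase e)) (pvAdvance e rem) (hadv _ (by
          intro v
          rw [getD_foldl_insertTail]
          exact (herase v).append (hperm.filterMap _)))]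
        simp [pvMstep, hT]

theorem zip_drop_zero (ss : List (List Int)) :
    List.zipWith (fun s n => s.drop n) ss (List.replicate ss.length 0) = ss := by
  induction ss with
  | nil => rfl
  | cons s rest ih => simp [List.replicate_succ, ih]

-- ===== VERDICT (by name: the statement is the Claim_ definition above) =====
theorem filter_path_to_scopes_spec : Claim_equal_filter_path_to_scopes := by
  intro path scopes _
  unfold Spec_filter_path_to_scopes filter_path_to_scopes filter_path_to_scopes_alt
  have hmap : scopes.map (fun _ => (0 : Int))
      = (List.replicate scopes.length 0).map (Nat.cast : Nat → Int) := by
    simp [List.map_const', List.map_replicate]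
  rw [hmap, A_model scopes path [] (List.replicate scopes.length 0) (by simp),
    zip_drop_zero, B_model path [] _ scopes (by
      intro v
      rw [getD_foldl_insertTail]
      simp)]
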